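-- pv_equiv track=rewrite | github.com/ym-dskr/paper_picker | src/main.py | _classify_papers_by_keywords
-- ===== SOURCE A (Python) =====
-- from typing import List, Dict, Optional
--
-- def _classify_papers_by_keywords(
--     papers: List[Dict],
--     keywords: List[str]
-- ) -> tuple[Dict[str, List[Dict]], List[Dict]]:
--     """論文をキーワード別に分類.
--
--     Args:
--         papers: 論文リスト
--         keywords: キーワードリスト
--
--     Returns:
--         キーワード別論文辞書と未分類論文リストのタプル
--     """
--     keyword_papers = {keyword: [] for keyword in keywords}
--     unmatched_papers = []
--
--     for paper in papers:
--         matched_keyword = _find_first_matching_keyword(paper, keywords)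
--
--         if matched_keyword:
--             keyword_papers[matched_keyword].append(paper)
--         else:
--             unmatched_papers.append(paper)
--
--     return keyword_papers, unmatched_papers
--
-- def _find_first_matching_keyword(paper: Dict, keywords: List[str]) -> Optional[str]:
--     """論文に最初にマッチするキーワードを見つける.
--
--     Args:
--         paper: 論文データ
--         keywords: キーワードリスト
--
--     Returns:
--         最初にマッチしたキーワード、なければNone
--     """
--     title = paper.get('title', '').lower()
--     abstract = paper.get('abstract', '').lower()
--     text = f"{title} {abstract}"
--
--     for keyword in keywords:
--         if keyword.lower() in text:
--             return keyword
--
--     return None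
-- ===== SOURCE B (Python) =====
-- from typing import List, Dict, Optional
--
-- def _classify_papers_by_keywords(
--     papers: List[Dict],
--     keywords: List[str]
-- ) -> tuple[Dict[str, List[Dict]], List[Dict]]:
--     """Keyword-outer partition: lower each paper's text once, then for each
--     keyword in priority order sweep only the still-unclassified papers."""
--     result = {keyword: [] for keyword in keywords}
--     remaining = [
--         (paper, f"{paper.get('title', '').lower()} {paper.get('abstract', '').lower()}")
--         for paper in papers
--     ]
--     for keyword in keywords:
--         low = keyword.lower()
--         result[keyword] += [paper for paper, text in remaining if low in text]
--         remaining = [pt for pt in remaining if low not in pt[1]]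
--     return result, [paper for paper, _ in remaining]
-- ===== Notes on version B (the rewrite author's own statement) =====
-- stated objective: alternative
-- what changed: A scans all keywords per paper, rebuilding the lowered text per paper and returning at the first hit; B lowers each paper's text once up front and then makes one partitioning sweep of the still-unclassified papers per keyword, so classified papers drop out of all later sweeps. Pre_ excludes keyword lists containing the empty string, a degenerate keyword that matches every text: A's truthiness test leaves such papers unclassified while B files them under '', and neither behaviour is specified.
-- outside the precondition, e.g. on _classify_papers_by_keywords([{}], ['']): A returns ({'': []}, [{}]), B returns ({'': [{}]}, [])
import Mathlib
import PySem

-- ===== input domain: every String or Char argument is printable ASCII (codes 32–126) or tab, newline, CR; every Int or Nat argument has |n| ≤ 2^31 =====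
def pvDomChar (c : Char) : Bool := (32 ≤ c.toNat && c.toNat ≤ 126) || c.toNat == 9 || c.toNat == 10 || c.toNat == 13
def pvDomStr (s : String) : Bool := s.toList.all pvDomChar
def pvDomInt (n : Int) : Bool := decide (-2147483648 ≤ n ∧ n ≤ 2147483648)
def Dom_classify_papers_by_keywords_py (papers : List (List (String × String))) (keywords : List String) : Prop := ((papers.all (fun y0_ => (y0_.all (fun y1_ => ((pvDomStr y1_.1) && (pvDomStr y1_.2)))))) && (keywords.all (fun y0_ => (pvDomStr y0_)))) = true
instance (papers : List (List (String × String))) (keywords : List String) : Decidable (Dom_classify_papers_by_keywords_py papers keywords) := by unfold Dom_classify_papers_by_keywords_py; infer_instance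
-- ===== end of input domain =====

-- B replaces A's paper-outer first-matching-keyword scan by keyword-outer partitioning
-- sweeps over precomputed lowered texts (objective: alternative; equal cost order).


-- ===== PORT A =====
-- f"{paper.get('title', '').lower()} {paper.get('abstract', '').lower()}" as a char list
-- (both Pythons build exactly this string); exact: paper.get is first-match lookup,
-- .lower() is PySem.Chars.lower.
def pvText (paper : List (String × String)) : List Char :=
  PySem.Chars.lower ((PySem.Dict.mk paper).getD "title" "").toList
    ++ ' ' :: PySem.Chars.lower ((PySem.Dict.mk paper).getD "abstract" "").toList

-- _find_first_matching_keyword: the for-loop with early return is List.find?;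
-- `keyword.lower() in text` is Chars.isIn of the lowered keyword.
def pvFindFirst (paper : List (String × String)) (keywords : List String) : Option String :=
  let text := pvText paper
  keywords.find? (fun keyword => PySem.Chars.isIn (PySem.Chars.lower keyword.toList) text)

def classify_papers_by_keywords_py (papers : List (List (String × String))) (keywords : List String) : (List (String × List (List (String × String)))) × (List (List (String × String))) :=
  -- keyword_papers = {keyword: [] for keyword in keywords}
  let keyword_papers : PySem.Dict String (List (List (String × String))) :=
    keywords.foldl (fun d keyword => d.insert keyword []) PySem.Dict.empty
  -- for paper in papers: ...  ('if matched_keyword:' is Python truthiness: '' is falsy)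
  let st := papers.foldl
    (fun st paper =>
      match pvFindFirst paper keywords with
      | some matched =>
          if matched = "" then (st.1, st.2 ++ [paper])
          else (st.1.modify matched [] (fun l => l ++ [paper]), st.2)
      | none => (st.1, st.2 ++ [paper]))
    (keyword_papers, ([] : List (List (String × String))))
  (st.1.items, st.2)

-- ===== PORT B =====
def classify_papers_by_keywords_py_alt (papers : List (List (String × String))) (keywords : List String) : (List (String × List (List (String × String)))) × (List (List (String × String))) :=
  -- result = {keyword: [] for keyword in keywords}
  let result : PySem.Dict String (List (List (String × String))) :=
    keywords.foldl (fun d keyword => d.insert keyword []) PySem.Dict.empty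
  -- remaining = [(paper, text(paper)) for paper in papers]
  let remaining := papers.map (fun paper => (paper, pvText paper))
  -- for keyword in keywords: one partitioning sweep of the still-unclassified papers
  let st := keywords.foldl
    (fun st keyword =>
      let low := PySem.Chars.lower keyword.toList
      (st.1.modify keyword [] (fun l => l ++ (st.2.filter (fun pt => PySem.Chars.isIn low pt.2)).map (·.1)),
       st.2.filter (fun pt => !PySem.Chars.isIn low pt.2)))
    (result, remaining)
  (st.1.items, st.2.map (·.1))

-- ===== PRECONDITION & SPEC =====
-- Pre_ excludes keyword lists containing the empty string, a degenerate keyword that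
-- matches every text: A's truthiness test leaves papers reaching it unclassified while
-- B files them under '', and neither behaviour is specified.
def Pre_classify_papers_by_keywords_py (papers : List (List (String × String))) (keywords : List String) : Prop :=
  "" ∉ keywords
instance (papers : List (List (String × String))) (keywords : List String) : Decidable (Pre_classify_papers_by_keywords_py papers keywords) := by unfold Pre_classify_papers_by_keywords_py; infer_instance

def pvWitness_classify_papers_by_keywords_py : (List (List (String × String))) × List String :=
  ([[("title", "Deep learning survey")], [("abstract", "graphs")]], ["deep", "sat"])

def Spec_classify_papers_by_keywords_py (papers : List (List (String × String))) (keywords : List String) (out : (List (String × List (List (String × String)))) × (List (List (String × String)))) : Prop := out = classify_papers_by_keywords_py_alt papers keywords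
instance (papers : List (List (String × String))) (keywords : List String) (out : (List (String × List (List (String × String)))) × (List (List (String × String)))) : Decidable (Spec_classify_papers_by_keywords_py papers keywords out) := by unfold Spec_classify_papers_by_keywords_py; infer_instance

-- ===== CLAIM (what is proved, stated in full; the proofs are below) =====
def Claim_equal_classify_papers_by_keywords_py : Prop := ∀ (papers : List (List (String × String))) (keywords : List String), Dom_classify_papers_by_keywords_py papers keywords → Pre_classify_papers_by_keywords_py papers keywords → Spec_classify_papers_by_keywords_py papers keywords (classify_papers_by_keywords_py papers keywords)

-- ===== LEMMAS AND PROOFS =====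

-- first keyword of kws whose lowered form occurs in text t
def pvFirst (kws : List String) (t : List Char) : Option String :=
  kws.find? (fun kw => PySem.Chars.isIn (PySem.Chars.lower kw.toList) t)

-- the common normal form both ports are reduced to
def pvCanon (papers : List (List (String × String))) (keywords : List String) : (List (String × List (List (String × String)))) × (List (List (String × String))) :=
  ((PySem.Set.ofList keywords).map (fun k => (k, papers.filter (fun p => pvFirst keywords (pvText p) == some k))),
   papers.filter (fun p => (pvFirst keywords (pvText p)).isNone))

theorem pvFirst_some {kws : List String} {t : List Char} {k : String} (h : pvFirst kws t = some k) :
    PySem.Chars.isIn (PySem.Chars.lower k.toList) t = true ∧ k ∈ kws := by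
  unfold pvFirst at h
  have hp := List.find?_some (p := fun kw : String => PySem.Chars.isIn (PySem.Chars.lower kw.toList) t) h
  exact ⟨hp, List.mem_of_find?_eq_some h⟩

theorem pvFirst_cons_pos {k : String} {t : List Char} (rest : List String)
    (h : PySem.Chars.isIn (PySem.Chars.lower k.toList) t = true) :
    pvFirst (k :: rest) t = some k := by
  unfold pvFirst
  exact List.find?_cons_of_pos h

theorem pvFirst_cons_neg {k : String} {t : List Char} (rest : List String)
    (h : PySem.Chars.isIn (PySem.Chars.lower k.toList) t = false) :
    pvFirst (k :: rest) t = pvFirst rest t := by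
  unfold pvFirst
  exact List.find?_cons_of_neg (by simp [h])

-- the dict {keyword: [] for keyword in keywords}
theorem pvInit_keys (keywords : List String) :
    ((keywords.foldl (fun d keyword => d.insert keyword ([] : List (List (String × String)))) PySem.Dict.empty)).keys
      = PySem.Set.ofList keywords := by
  exact PySem.Dict.keys_foldl_insert keywords (fun _ _ => []) PySem.Dict.empty

theorem pvInit_nodup (keywords : List String) :
    ((keywords.foldl (fun d keyword => d.insert keyword ([] : List (List (String × String)))) PySem.Dict.empty)).keys.Nodup := by
  exact PySem.Dict.nodup_keys_foldl_insert keywords (fun _ _ => []) PySem.Dict.empty PySem.Dict.nodup_keys_empty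

-- every value of the initial dict is []
theorem pvInit_getD_aux (l : List String) :
    ∀ (d : PySem.Dict String (List (List (String × String)))),
      (∀ k, d.getD k [] = []) → ∀ k, (l.foldl (fun d keyword => d.insert keyword []) d).getD k [] = [] := by
  induction l with
  | nil => intro d hd k; exact hd k
  | cons a rest ih =>
    intro d hd k
    refine ih _ (fun k' => ?_) k
    rw [PySem.Dict.getD_insert]
    split <;> simp [hd]

theorem pvInit_items (keywords : List String) :
    ((keywords.foldl (fun d keyword => d.insert keyword ([] : List (List (String × String)))) PySem.Dict.empty)).items
      = (PySem.Set.ofList keywords).map (fun k => (k, ([] : List (List (String × String))))) := by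
  rw [PySem.Dict.items_eq_map_keys _ (pvInit_nodup keywords) [], pvInit_keys]
  refine List.map_congr_left (fun k _ => ?_)
  rw [pvInit_getD_aux keywords PySem.Dict.empty (fun k => by simp [PySem.Dict.getD_empty]) k]

theorem pvInit_contains (keywords : List String) {k : String} (h : k ∈ keywords) :
    ((keywords.foldl (fun d keyword => d.insert keyword ([] : List (List (String × String)))) PySem.Dict.empty)).contains k = true := by
  rw [PySem.Dict.contains_iff_mem_keys, pvInit_keys]
  exact (PySem.Set.mem_ofList keywords k).mpr h

-- A's paper loop, characterised against any dict whose keys cover the matches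
theorem pvA_fold (keywords : List String) :
    ∀ (papers : List (List (String × String))) (d : PySem.Dict String (List (List (String × String)))) (u : List (List (String × String))),
      d.keys.Nodup →
      (∀ p ∈ papers, ∀ k, pvFindFirst p keywords = some k → d.contains k = true) →
      (papers.foldl
        (fun st paper =>
          match pvFindFirst paper keywords with
          | some matched =>
              if matched = "" then (st.1, st.2 ++ [paper])
              else (st.1.modify matched [] (fun l => l ++ [paper]), st.2)
          | none => (st.1, st.2 ++ [paper]))
        (d, u)).2 = u ++ papers.filter (fun p => ((pvFirst keywords (pvText p)).getD "") == "")
      ∧ (papers.foldl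
        (fun st paper =>
          match pvFindFirst paper keywords with
          | some matched =>
              if matched = "" then (st.1, st.2 ++ [paper])
              else (st.1.modify matched [] (fun l => l ++ [paper]), st.2)
          | none => (st.1, st.2 ++ [paper]))
        (d, u)).1.items
        = d.items.map (fun kv => (kv.1, kv.2 ++ papers.filter (fun p => (pvFirst keywords (pvText p) == some kv.1) && kv.1 != ""))) := by
  intro papers
  induction papers with
  | nil =>
    intro d u hnd hc
    constructor
    · simp
    · simp
  | cons p ps ih =>
    intro d u hnd hc
    rw [List.foldl_cons]
    have hf : pvFindFirst p keywords = pvFirst keywords (pvText p) := rfl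
    cases hfp : pvFirst keywords (pvText p) with
    | none =>
      rw [hfp] at hf
      simp only [hf]
      obtain ⟨h2, h1⟩ := ih d (u ++ [p]) hnd (fun q hq => hc q (List.mem_cons_of_mem _ hq))
      constructor
      · rw [h2, List.filter_cons_of_pos (by simp [hfp]), List.append_assoc, List.singleton_append]
      · rw [h1]
        refine List.map_congr_left (fun kv _ => ?_)
        rw [List.filter_cons_of_neg (by simp [hfp])]
    | some matched =>
      rw [hfp] at hf
      by_cases hm : matched = ""
      · subst hm
        simp only [hf, reduceIte]
        obtain ⟨h2, h1⟩ := ih d (u ++ [p]) hnd (fun q hq => hc q (List.mem_cons_of_mem _ hq))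
        constructor
        · rw [h2, List.filter_cons_of_pos (by simp [hfp]), List.append_assoc, List.singleton_append]
        · rw [h1]
          refine List.map_congr_left (fun kv _ => ?_)
          rw [List.filter_cons_of_neg ?_]
          by_cases hkv : kv.1 = "" <;> simp [hfp, hkv]
      · simp only [hf, if_neg hm]
        have hcont : d.contains matched = true := hc p List.mem_cons_self matched hf
        have hmod : (d.modify matched [] (fun l => l ++ [p])).items
            = d.items.map (fun q => if q.1 == matched then (matched, d.getD matched [] ++ [p]) else q) := by
          rw [show d.modify matched [] (fun l => l ++ [p]) = d.insert matched (d.getD matched [] ++ [p]) from rfl]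
          exact PySem.Dict.items_insert_of_contains d _ hcont
        have hkeys : (d.modify matched [] (fun l => l ++ [p])).keys = d.keys := by
          rw [PySem.Dict.keys_modify]
          exact PySem.Dict.keys_insert_of_contains d _ hcont
        obtain ⟨h2, h1⟩ := ih (d.modify matched [] (fun l => l ++ [p])) u (hkeys ▸ hnd)
          (fun q hq k hk => by
            rw [PySem.Dict.contains_modify]
            rw [hc q (List.mem_cons_of_mem _ hq) k hk]
            simp)
        constructor
        · rw [h2, List.filter_cons_of_neg (by simp [hfp, hm])]
        · rw [h1, hmod, List.map_map]
          refine List.map_congr_left (fun kv hkv => ?_)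
          by_cases hq : kv.1 = matched
          · have hget : d.getD matched [] = kv.2 := by
              have h' : (matched, kv.2) ∈ d.items := by rw [← hq]; simpa using hkv
              exact PySem.Dict.getD_of_mem_items d h' hnd []
            simp only [Function.comp_apply, if_pos (by simp [hq] : (kv.1 == matched) = true)]
            rw [hget, hq, List.filter_cons_of_pos (by simp [hfp, hm]), List.append_assoc, List.singleton_append]
          · simp only [Function.comp_apply, if_neg (by simp [hq] : ¬ (kv.1 == matched) = true)]
            rw [List.filter_cons_of_neg (by simp [hfp, Ne.symm hq])]

-- B's keyword loop, characterised the same way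
theorem pvB_fold :
    ∀ (act : List String) (d : PySem.Dict String (List (List (String × String)))) (rem : List ((List (String × String)) × List Char)),
      d.keys.Nodup →
      (∀ k ∈ act, d.contains k = true) →
      (act.foldl
        (fun st keyword =>
          let low := PySem.Chars.lower keyword.toList
          (st.1.modify keyword [] (fun l => l ++ (st.2.filter (fun pt => PySem.Chars.isIn low pt.2)).map (·.1)),
           st.2.filter (fun pt => !PySem.Chars.isIn low pt.2)))
        (d, rem)).2 = rem.filter (fun pt => (pvFirst act pt.2).isNone)
      ∧ (act.foldl
        (fun st keyword =>
          let low := PySem.Chars.lower keyword.toList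
          (st.1.modify keyword [] (fun l => l ++ (st.2.filter (fun pt => PySem.Chars.isIn low pt.2)).map (·.1)),
           st.2.filter (fun pt => !PySem.Chars.isIn low pt.2)))
        (d, rem)).1.items
        = d.items.map (fun kv => (kv.1, kv.2 ++ (rem.filter (fun pt => pvFirst act pt.2 == some kv.1)).map (·.1))) := by
  intro act
  induction act with
  | nil =>
    intro d rem hnd hc
    constructor
    · simp [pvFirst]
    · simp [pvFirst]
  | cons k rest ih =>
    intro d rem hnd hc
    rw [List.foldl_cons]
    simp only
    have hcont : d.contains k = true := hc k List.mem_cons_self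
    have hmod : (d.modify k [] (fun l => l ++ (rem.filter (fun pt => PySem.Chars.isIn (PySem.Chars.lower k.toList) pt.2)).map (·.1))).items
        = d.items.map (fun q => if q.1 == k then (k, d.getD k [] ++ (rem.filter (fun pt => PySem.Chars.isIn (PySem.Chars.lower k.toList) pt.2)).map (·.1)) else q) := by
      rw [show d.modify k [] (fun l => l ++ (rem.filter (fun pt => PySem.Chars.isIn (PySem.Chars.lower k.toList) pt.2)).map (·.1))
            = d.insert k (d.getD k [] ++ (rem.filter (fun pt => PySem.Chars.isIn (PySem.Chars.lower k.toList) pt.2)).map (·.1)) from rfl]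
      exact PySem.Dict.items_insert_of_contains d _ hcont
    have hkeys : (d.modify k [] (fun l => l ++ (rem.filter (fun pt => PySem.Chars.isIn (PySem.Chars.lower k.toList) pt.2)).map (·.1))).keys = d.keys := by
      rw [PySem.Dict.keys_modify]
      exact PySem.Dict.keys_insert_of_contains d _ hcont
    obtain ⟨h2, h1⟩ := ih (d.modify k [] (fun l => l ++ (rem.filter (fun pt => PySem.Chars.isIn (PySem.Chars.lower k.toList) pt.2)).map (·.1)))
      (rem.filter (fun pt => !PySem.Chars.isIn (PySem.Chars.lower k.toList) pt.2))
      (hkeys ▸ hnd)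
      (fun k' hk' => by
        rw [PySem.Dict.contains_modify]
        rw [hc k' (List.mem_cons_of_mem _ hk')]
        simp)
    constructor
    · rw [h2, List.filter_filter]
      refine List.filter_congr (fun pt _ => ?_)
      cases hm : PySem.Chars.isIn (PySem.Chars.lower k.toList) pt.2 with
      | true => rw [pvFirst_cons_pos rest hm]; simp
      | false => rw [pvFirst_cons_neg rest hm]; simp
    · rw [h1, hmod, List.map_map]
      refine List.map_congr_left (fun kv hkv => ?_)
      by_cases hq : kv.1 = k
      · have hget : d.getD k [] = kv.2 := by
          have h' : (k, kv.2) ∈ d.items := by rw [← hq]; simpa using hkv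
          exact PySem.Dict.getD_of_mem_items d h' hnd []
        simp only [Function.comp_apply, if_pos (by simp [hq] : (kv.1 == k) = true)]
        rw [hget, hq]
        have hnil : (rem.filter (fun pt => !PySem.Chars.isIn (PySem.Chars.lower k.toList) pt.2)).filter
            (fun pt => pvFirst rest pt.2 == some k) = [] := by
          rw [List.filter_filter]
          refine List.filter_eq_nil_iff.mpr (fun pt _ => ?_)
          cases hm : PySem.Chars.isIn (PySem.Chars.lower k.toList) pt.2 with
          | true => simp
          | false =>
            cases hr : pvFirst rest pt.2 with
            | none => simp
            | some k' =>
              by_cases hk' : k' = k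
              · subst hk'; rw [(pvFirst_some hr).1] at hm; simp at hm
              · simp [hk']
        rw [hnil]
        have hhits : rem.filter (fun pt => pvFirst (k :: rest) pt.2 == some k)
            = rem.filter (fun pt => PySem.Chars.isIn (PySem.Chars.lower k.toList) pt.2) := by
          refine List.filter_congr (fun pt _ => ?_)
          cases hm : PySem.Chars.isIn (PySem.Chars.lower k.toList) pt.2 with
          | true => rw [pvFirst_cons_pos rest hm]; simp
          | false =>
            rw [pvFirst_cons_neg rest hm]
            cases hr : pvFirst rest pt.2 with
            | none => simp
            | some k' =>
              by_cases hk' : k' = k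
              · subst hk'; rw [(pvFirst_some hr).1] at hm; simp at hm
              · simp [hk']
        rw [hhits]
        simp
      · simp only [Function.comp_apply, if_neg (by simp [hq] : ¬ (kv.1 == k) = true)]
        rw [List.filter_filter]
        congr 1
        congr 1
        congr 1
        refine List.filter_congr (fun pt _ => ?_)
        cases hm : PySem.Chars.isIn (PySem.Chars.lower k.toList) pt.2 with
        | true => rw [pvFirst_cons_pos rest hm]; simp [Ne.symm hq]
        | false => rw [pvFirst_cons_neg rest hm]; simp

theorem pvA_eq_canon (papers : List (List (String × String))) (keywords : List String)
    (hpre : "" ∉ keywords) :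
    classify_papers_by_keywords_py papers keywords = pvCanon papers keywords := by
  obtain ⟨h2, h1⟩ := pvA_fold keywords papers
      (keywords.foldl (fun d keyword => d.insert keyword []) PySem.Dict.empty) []
      (pvInit_nodup keywords)
      (fun p _ k hk => pvInit_contains keywords (pvFirst_some (show pvFirst keywords (pvText p) = some k from hk)).2)
  show ((papers.foldl
        (fun st paper =>
          match pvFindFirst paper keywords with
          | some matched =>
              if matched = "" then (st.1, st.2 ++ [paper])
              else (st.1.modify matched [] (fun l => l ++ [paper]), st.2)
          | none => (st.1, st.2 ++ [paper]))
        (keywords.foldl (fun d keyword => d.insert keyword []) PySem.Dict.empty, [])).1.items,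
       (papers.foldl
        (fun st paper =>
          match pvFindFirst paper keywords with
          | some matched =>
              if matched = "" then (st.1, st.2 ++ [paper])
              else (st.1.modify matched [] (fun l => l ++ [paper]), st.2)
          | none => (st.1, st.2 ++ [paper]))
        (keywords.foldl (fun d keyword => d.insert keyword []) PySem.Dict.empty, [])).2) = pvCanon papers keywords
  rw [h1, h2, pvInit_items, List.map_map]
  unfold pvCanon
  rw [Prod.mk.injEq]
  constructor
  · refine List.map_congr_left (fun k hk => ?_)
    have hkne : k ≠ "" := by
      intro h; subst h
      exact hpre ((PySem.Set.mem_ofList keywords "").mp hk)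
    simp only [Function.comp_apply, List.nil_append]
    congr 1
    refine List.filter_congr (fun p _ => ?_)
    simp [hkne]
  · rw [List.nil_append]
    refine List.filter_congr (fun p _ => ?_)
    cases h : pvFirst keywords (pvText p) with
    | none => simp
    | some k =>
      have hkne : k ≠ "" := by
        intro he; subst he
        exact hpre (pvFirst_some h).2
      simp [hkne]

theorem pvB_eq_canon (papers : List (List (String × String))) (keywords : List String) :
    classify_papers_by_keywords_py_alt papers keywords = pvCanon papers keywords := by
  obtain ⟨h2, h1⟩ := pvB_fold keywords
      (keywords.foldl (fun d keyword => d.insert keyword []) PySem.Dict.empty)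
      (papers.map (fun paper => (paper, pvText paper)))
      (pvInit_nodup keywords)
      (fun k hk => pvInit_contains keywords hk)
  show ((keywords.foldl
        (fun st keyword =>
          let low := PySem.Chars.lower keyword.toList
          (st.1.modify keyword [] (fun l => l ++ (st.2.filter (fun pt => PySem.Chars.isIn low pt.2)).map (·.1)),
           st.2.filter (fun pt => !PySem.Chars.isIn low pt.2)))
        (keywords.foldl (fun d keyword => d.insert keyword []) PySem.Dict.empty,
         papers.map (fun paper => (paper, pvText paper)))).1.items,
       (keywords.foldl
        (fun st keyword =>
          let low := PySem.Chars.lower keyword.toList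
          (st.1.modify keyword [] (fun l => l ++ (st.2.filter (fun pt => PySem.Chars.isIn low pt.2)).map (·.1)),
           st.2.filter (fun pt => !PySem.Chars.isIn low pt.2)))
        (keywords.foldl (fun d keyword => d.insert keyword []) PySem.Dict.empty,
         papers.map (fun paper => (paper, pvText paper)))).2.map (·.1)) = pvCanon papers keywords
  rw [h1, h2, pvInit_items, List.map_map]
  unfold pvCanon
  rw [Prod.mk.injEq]
  constructor
  · refine List.map_congr_left (fun k _ => ?_)
    simp only [Function.comp_apply, List.nil_append]
    rw [List.filter_map, List.map_map]
    simp [Function.comp_def]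
  · rw [List.filter_map, List.map_map]
    simp [Function.comp_def]

-- ===== VERDICT (by name: the statement is the Claim_ definition above) =====
theorem classify_papers_by_keywords_py_spec : Claim_equal_classify_papers_by_keywords_py := by
  intro papers keywords _ hpre
  unfold Spec_classify_papers_by_keywords_py
  rw [pvA_eq_canon papers keywords hpre, pvB_eq_canon]
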